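-- pv_equiv track=rewrite | github.com/juan-ivan-NV/My-learnings | Codewars_katas/py_6_kyu_split_and_then_add_both_sides_of_an_array_together.py | split_and_add
-- ===== SOURCE A (Python) =====
-- def split_and_add(numbers, n):
--     l = numbers
--     x = 0
--     if n == 0:
--         return l
--     else:
--         while x < n:
--             half1 = l[:len(l)//2]
--             half2 = l[len(l)//2:]
--             l = [sum(x) for x in zip(half2[::-1],half1[::-1])][::-1]
--             if len(l) != len(half2):
--                 l.insert(0,half2[0])
--             x += 1
--     return l
-- ===== SOURCE B (Python) =====
-- def split_and_add(numbers, n):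
--     # Different algorithm: instead of rebuilding the list fold after fold,
--     # record the sequence of lengths at which effective folds happen, then
--     # route each original element through the index map of every fold to its
--     # final bucket and accumulate it there in a single pass.
--     if n == 0:
--         return numbers
--     lengths = []
--     cur = len(numbers)
--     steps = 0
--     while steps < n and cur > 1:
--         lengths.append(cur)
--         cur -= cur // 2
--         steps += 1
--     out = [0] * cur
--     for i, v in enumerate(numbers):
--         j = i
--         for m in lengths:
--             mid = m // 2
--             par = m % 2
--             if j < mid:
--                 j += par
--             elif par and j == mid:
--                 j = 0
--             else:
--                 j -= mid
--         out[j] += v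
--     return out
-- ===== Notes on version B (the rewrite author's own statement) =====
-- stated objective: alternative
-- what changed: Instead of rebuilding the list fold after fold like A, B first records the sequence of lengths at which effective folds happen, then routes each original element through the per-fold index maps to its final bucket and accumulates all elements into a preallocated output in a single pass.
import Mathlib
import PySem

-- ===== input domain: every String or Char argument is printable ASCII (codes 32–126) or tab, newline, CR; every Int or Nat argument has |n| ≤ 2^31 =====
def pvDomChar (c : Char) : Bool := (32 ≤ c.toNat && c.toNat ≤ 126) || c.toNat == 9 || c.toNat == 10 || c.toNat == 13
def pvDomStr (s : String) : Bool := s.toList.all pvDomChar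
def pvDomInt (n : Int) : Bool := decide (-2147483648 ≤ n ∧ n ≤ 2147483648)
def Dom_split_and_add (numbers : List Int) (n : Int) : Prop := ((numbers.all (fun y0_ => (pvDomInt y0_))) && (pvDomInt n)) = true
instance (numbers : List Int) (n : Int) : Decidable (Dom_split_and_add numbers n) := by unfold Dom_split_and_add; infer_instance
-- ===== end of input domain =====

-- B uses a different algorithm: instead of rebuilding the list fold after fold, it records
-- the sequence of lengths at which effective folds happen, routes each original element
-- through the per-fold index map to its final bucket, and accumulates it there in one pass.

-- ===== PORT A =====
-- one iteration of A's while body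
def pvStepA (l : List Int) : List Int :=
  let half1 := PySem.List.slice l none (some (PySem.Int.floordiv (l.length : Int) 2))
  let half2 := PySem.List.slice l (some (PySem.Int.floordiv (l.length : Int) 2)) none
  -- [sum(x) for x in zip(half2[::-1], half1[::-1])][::-1]; sum of the 2-tuple is x.1 + x.2,
  -- s[::-1] is List.reverse (slice with step -1 over the whole list)
  let l' := ((List.zip half2.reverse half1.reverse).map (fun x => x.1 + x.2)).reverse
  if l'.length ≠ half2.length then
    -- half2[0]: in range here, since l'.length ≠ half2.length forces half2 ≠ []
    PySem.List.insert l' 0 (PySem.List.pyGetD half2 0 0)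
  else l'

-- 'while x < n' with x starting at 0 and x += 1: runs (n - x) more times, fuel = remaining count
def pvLoopA (l : List Int) : Nat → List Int
  | 0 => l
  | k + 1 => pvLoopA (pvStepA l) k

def split_and_add (numbers : List Int) (n : Int) : List Int :=
  if n = 0 then numbers
  else pvLoopA numbers n.toNat

-- ===== PORT B =====
-- the index map of one fold at length m (B's inner-loop body)
def pvJump (j m : Nat) : Nat :=
  let mid := m / 2
  let par := m % 2
  if j < mid then j + par
  else if par = 1 ∧ j = mid then 0
  else j - mid

-- B's first while loop: the lengths at which effective folds happen, and the final length
def pvLens (cur : Nat) (steps : Nat) (n : Int) : List Nat × Nat :=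
  if (steps : Int) < n ∧ 1 < cur then
    let r := pvLens (cur - cur / 2) (steps + 1) n
    (cur :: r.1, r.2)
  else ([], cur)
termination_by (n - steps).toNat
decreasing_by omega

def split_and_add_alt (numbers : List Int) (n : Int) : List Int :=
  if n = 0 then numbers
  else
    let r := pvLens numbers.length 0 n
    -- out = [0]*cur; for i, v in enumerate(numbers): out[dest(i)] += v
    numbers.zipIdx.foldl
      (fun out vi =>
        let j := r.1.foldl pvJump vi.2
        out.set j (out.getD j 0 + vi.1))
      (List.replicate r.2 0)

-- ===== PRECONDITION & SPEC =====
def Spec_split_and_add (numbers : List Int) (n : Int) (out : List Int) : Prop := out = split_and_add_alt numbers n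
instance (numbers : List Int) (n : Int) (out : List Int) : Decidable (Spec_split_and_add numbers n out) := by unfold Spec_split_and_add; infer_instance

-- ===== CLAIM (what is proved, stated in full; the proofs are below) =====
def Claim_equal_split_and_add : Prop := ∀ (numbers : List Int) (n : Int), Dom_split_and_add numbers n → Spec_split_and_add numbers n (split_and_add numbers n)

-- ===== LEMMAS AND PROOFS =====

-- A's loop body, in direct index-addition form (proof-side bridge)
def pvFoldOnce (l : List Int) : List Int :=
  let mid := l.length / 2
  let par := l.length % 2
  (if par = 1 then [PySem.List.pyGetD l (mid : Nat) 0] else []) ++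
    (List.range mid).map (fun i =>
      PySem.List.pyGetD l ((mid + par + i : Nat) : Int) 0 + PySem.List.pyGetD l ((i : Nat) : Int) 0)

-- the core of one fold: A's reverse-zip-sum-reverse equals direct index addition
lemma core (l : List Int) :
    ((List.zip (l.drop (l.length/2)).reverse (l.take (l.length/2)).reverse).map (fun x => x.1 + x.2)).reverse
    = (List.range (l.length/2)).map (fun i =>
        l.getD (l.length/2 + l.length % 2 + i) 0 + l.getD i 0) := by
  set m := l.length / 2 with hm
  have hlen : l.length = 2*m + l.length % 2 := by omega
  apply List.ext_getElem
  · simp; omega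
  · intro i h1 h2
    have hi : i < m := by simpa using h2
    have hz : m - 1 - i < min (l.length - m) m := by omega
    simp only [List.getElem_reverse, List.getElem_map, List.getElem_zip, List.getElem_range,
      List.length_map, List.length_zip, List.length_reverse, List.length_drop, List.length_take,
      List.getElem_drop, List.getElem_take]
    have hmin2 : min m l.length = m := by omega
    simp only [hmin2]
    have hmin1 : min (l.length - m) m = m := by omega
    simp only [hmin1]
    have e1 : m + (l.length - m - 1 - (m - 1 - i)) = m + l.length % 2 + i := by omega
    have e2 : m - 1 - (m - 1 - i) = i := by omega
    simp only [e1, e2]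
    rw [List.getD_eq_getElem _ _ (by omega), List.getD_eq_getElem _ _ (by omega)]

-- the two loop bodies compute the same list
lemma step_eq_fold (l : List Int) : pvStepA l = pvFoldOnce l := by
  unfold pvStepA pvFoldOnce
  dsimp only
  have hf : PySem.Int.floordiv (l.length : Int) 2 = ((l.length / 2 : Nat) : Int) := by
    exact_mod_cast PySem.Int.floordiv_natCast l.length 2
  rw [hf, PySem.List.slice_to_natCast, PySem.List.slice_from_natCast, core]
  simp only [PySem.List.pyGetD_natCast]
  rcases Nat.mod_two_eq_zero_or_one l.length with hp | hp
  · have hcond : ¬ (((List.range (l.length/2)).map (fun i =>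
        l.getD (l.length/2 + l.length % 2 + i) 0 + l.getD i 0)).length ≠ (l.drop (l.length/2)).length) := by
      simp [hp]; omega
    rw [if_neg hcond, hp]
    simp
  · have hcond : (((List.range (l.length/2)).map (fun i =>
        l.getD (l.length/2 + l.length % 2 + i) 0 + l.getD i 0)).length ≠ (l.drop (l.length/2)).length) := by
      simp [hp]; omega
    rw [if_pos hcond, hp]
    have hd : PySem.List.pyGetD (l.drop (l.length/2)) 0 0 = l.getD (l.length/2) 0 := by
      rw [PySem.List.pyGetD_zero]
      rw [List.getD_eq_getElem _ _ (by simp; omega), List.getD_eq_getElem _ _ (by omega)]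
      simp
    rw [hd]
    have h0 : (min (0:Int) ((l.length : Int) / 2)).toNat = 0 := by omega
    simp [PySem.List.insert, PySem.List.sliceIndices, h0]

lemma foldOnce_length (l : List Int) : (pvFoldOnce l).length = l.length - l.length / 2 := by
  unfold pvFoldOnce
  rcases Nat.mod_two_eq_zero_or_one l.length with hp | hp <;> simp [hp] <;> omega

-- folding a list of length ≤ 1 is the identity
lemma fold_fix (l : List Int) (h : l.length ≤ 1) : pvFoldOnce l = l := by
  match l, h with
  | [], _ => rfl
  | [x], _ => simp [pvFoldOnce]

lemma loopA_fix (l : List Int) (h : l.length ≤ 1) : ∀ k, pvLoopA l k = l := by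
  intro k
  induction k with
  | zero => rfl
  | succ k ih => rw [pvLoopA, step_eq_fold, fold_fix l h]; exact ih

-- Nat-fueled version of pvLens (fuel = remaining iteration count)
def pvLensF (cur : Nat) : Nat → List Nat × Nat
  | 0 => ([], cur)
  | k + 1 =>
    if 1 < cur then
      let r := pvLensF (cur - cur / 2) k
      (cur :: r.1, r.2)
    else ([], cur)

lemma pvLens_eq_fuel : ∀ (k : Nat) (cur steps : Nat) (n : Int), (n - steps).toNat = k →
    pvLens cur steps n = pvLensF cur k := by
  intro k
  induction k with
  | zero =>
    intro cur steps n h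
    rw [pvLens, if_neg (by omega)]
    rfl
  | succ k ih =>
    intro cur steps n h
    rw [pvLens, pvLensF]
    by_cases hc : 1 < cur
    · rw [if_pos ⟨by omega, hc⟩, if_pos hc, ih (cur - cur / 2) (steps + 1) n (by omega)]
    · rw [if_neg (by tauto), if_neg hc]

-- B's scatter loop, abstracted over the destination function
def pvScatter (g : Nat → Nat) (out0 : List Int) (l : List Int) (k : Nat) : List Int :=
  (l.zipIdx k).foldl
    (fun out vi => out.set (g vi.2) (out.getD (g vi.2) 0 + vi.1)) out0

-- the bucket contributions of l (indices offset by k) under destination g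
def pvCSum (g : Nat → Nat) (b : Nat) : List Int → Nat → Int
  | [], _ => 0
  | v :: t, k => (if g k = b then v else 0) + pvCSum g b t (k + 1)

lemma getD_set (l : List Int) (j b : Nat) (x : Int) (hb : b < l.length) :
    (l.set j x).getD b 0 = if j = b then x else l.getD b 0 := by
  rcases eq_or_ne j b with rfl | h
  · rw [List.getD_eq_getElem _ _ (by simpa using hb)]
    simp [List.getElem_set_self]
  · rw [List.getD_eq_getElem _ _ (by simpa using hb), List.getD_eq_getElem _ _ hb]
    simp [h]

-- Lemma A: the scatter loop computes, bucket by bucket, start value plus contribution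
lemma scatter_eq_map : ∀ (l : List Int) (g : Nat → Nat) (out0 : List Int) (k : Nat),
    pvScatter g out0 l k = (List.range out0.length).map (fun b => out0.getD b 0 + pvCSum g b l k) := by
  intro l
  induction l with
  | nil =>
    intro g out0 k
    apply List.ext_getElem
    · simp [pvScatter]
    · intro b h1 h2
      have hb : b < out0.length := by simpa [pvScatter] using h1
      simp [pvScatter, pvCSum, List.getElem?_eq_getElem hb]
  | cons v t ih =>
    intro g out0 k
    have hz : (v :: t).zipIdx k = (v, k) :: t.zipIdx (k + 1) := by simp [List.zipIdx]
    rw [pvScatter, hz]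
    simp only [List.foldl_cons]
    rw [← pvScatter]
    rw [ih g _ (k + 1)]
    apply List.ext_getElem
    · simp
    · intro b h1 h2
      have hb : b < out0.length := by simpa using h1
      simp only [List.getElem_map, List.getElem_range]
      rw [getD_set _ _ _ _ hb, pvCSum]
      split_ifs with hgk
      · rw [hgk]; ring
      · ring

-- pvCSum as a Finset sum
lemma cSum_eq_sum : ∀ (l : List Int) (g : Nat → Nat) (b k : Nat),
    pvCSum g b l k = ∑ i ∈ Finset.range l.length, (if g (k + i) = b then l.getD i 0 else 0) := by
  intro l
  induction l with
  | nil => intro g b k; simp [pvCSum]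
  | cons v t ih =>
    intro g b k
    rw [pvCSum, ih g b (k + 1)]
    rw [List.length_cons, Finset.sum_range_succ']
    simp only [List.getD_cons_succ, List.getD_cons_zero, Nat.add_zero]
    have : ∀ i, k + 1 + i = k + (i + 1) := by omega
    simp only [this]
    ring

-- identity destination rebuilds the list
lemma scatter_id (l : List Int) :
    pvScatter (fun i => i) (List.replicate l.length 0) l 0 = l := by
  rw [scatter_eq_map]
  apply List.ext_getElem
  · simp
  · intro b h1 h2
    have hb : b < l.length := by simpa using h1
    simp only [List.getElem_map, List.getElem_range, List.length_replicate]
    rw [cSum_eq_sum]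
    simp only [Nat.zero_add]
    rw [Finset.sum_ite_eq_of_mem' (Finset.range l.length) b (fun i => l.getD i 0) (by simpa using hb)]
    rw [List.getD_eq_getElem _ _ hb]
    simp

-- Lemma B: contributions regroup across one fold
lemma cSum_jump (l : List Int) (g : Nat → Nat) (b : Nat) :
    pvCSum (fun i => g (pvJump i l.length)) b l 0 = pvCSum g b (pvFoldOnce l) 0 := by
  rw [cSum_eq_sum, cSum_eq_sum]
  simp only [Nat.zero_add]
  set m := l.length with hm
  set mid := m / 2 with hmid
  rcases Nat.mod_two_eq_zero_or_one m with hp | hp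
  · -- even: m = 2*mid, fold has length mid
    have hF : pvFoldOnce l = (List.range mid).map (fun i => l.getD (mid + i) 0 + l.getD i 0) := by
      unfold pvFoldOnce
      rw [← hm, ← hmid, hp]
      simp only [PySem.List.pyGetD_natCast]
      simp
    have hml : m = mid + mid := by omega
    have hsplit := Finset.sum_range_add
      (fun i => if g (pvJump i m) = b then l.getD i 0 else 0) mid mid
    rw [← hml] at hsplit
    rw [hF, hsplit]
    have hlen : ((List.range mid).map (fun i => l.getD (mid + i) 0 + l.getD i 0)).length = mid := by simp
    rw [hlen]
    have e1 : ∀ i ∈ Finset.range mid,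
        (if g (pvJump i m) = b then l.getD i 0 else 0) = (if g i = b then l.getD i 0 else 0) := by
      intro i hi
      have hil : i < mid := Finset.mem_range.mp hi
      have : pvJump i m = i := by
        simp only [pvJump]
        split_ifs <;> omega
      rw [this]
    have e2 : ∀ i ∈ Finset.range mid,
        (if g (pvJump (mid + i) m) = b then l.getD (mid + i) 0 else 0)
          = (if g i = b then l.getD (mid + i) 0 else 0) := by
      intro i hi
      have hil : i < mid := Finset.mem_range.mp hi
      have : pvJump (mid + i) m = i := by
        simp only [pvJump]
        split_ifs <;> omega
      rw [this]
    rw [Finset.sum_congr rfl e1, Finset.sum_congr rfl e2]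
    have e3 : ∀ i ∈ Finset.range mid,
        (if g i = b then ((List.range mid).map (fun i => l.getD (mid + i) 0 + l.getD i 0)).getD i 0 else 0)
          = (if g i = b then l.getD i 0 else 0) + (if g i = b then l.getD (mid + i) 0 else 0) := by
      intro i hi
      have hil : i < mid := Finset.mem_range.mp hi
      have : ((List.range mid).map (fun i => l.getD (mid + i) 0 + l.getD i 0)).getD i 0
          = l.getD (mid + i) 0 + l.getD i 0 := by
        rw [List.getD_eq_getElem _ _ (by simpa using hil)]
        simp
      rw [this]
      split_ifs <;> ring
    rw [Finset.sum_congr rfl e3, Finset.sum_add_distrib]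
  · -- odd: m = 2*mid + 1, fold = l[mid] :: map
    have hF : pvFoldOnce l = l.getD mid 0 :: (List.range mid).map (fun i => l.getD (mid + 1 + i) 0 + l.getD i 0) := by
      unfold pvFoldOnce
      rw [← hm, ← hmid, hp]
      simp only [PySem.List.pyGetD_natCast]
      simp
    have hml : m = mid + (mid + 1) := by omega
    have hsplit := Finset.sum_range_add
      (fun i => if g (pvJump i m) = b then l.getD i 0 else 0) mid (mid + 1)
    rw [← hml] at hsplit
    rw [hF, hsplit, Finset.sum_range_succ']
    have e1 : ∀ i ∈ Finset.range mid,
        (if g (pvJump i m) = b then l.getD i 0 else 0) = (if g (i + 1) = b then l.getD i 0 else 0) := by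
      intro i hi
      have hil : i < mid := Finset.mem_range.mp hi
      have : pvJump i m = i + 1 := by
        simp only [pvJump]
        split_ifs <;> omega
      rw [this]
    have e2 : ∀ i ∈ Finset.range mid,
        (if g (pvJump (mid + (i + 1)) m) = b then l.getD (mid + (i + 1)) 0 else 0)
          = (if g (i + 1) = b then l.getD (mid + 1 + i) 0 else 0) := by
      intro i hi
      have hil : i < mid := Finset.mem_range.mp hi
      have hj : pvJump (mid + (i + 1)) m = i + 1 := by
        simp only [pvJump]
        split_ifs <;> omega
      have hx : mid + (i + 1) = mid + 1 + i := by omega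
      rw [hj, hx]
    have e0 : pvJump (mid + 0) m = 0 := by
      simp only [pvJump]
      split_ifs <;> omega
    rw [Finset.sum_congr rfl e1, Finset.sum_congr rfl e2, e0]
    -- RHS: peel index 0 of the cons
    rw [List.length_cons, List.length_map, List.length_range, Finset.sum_range_succ']
    simp only [List.getD_cons_succ, List.getD_cons_zero]
    have e3 : ∀ i ∈ Finset.range mid,
        (if g (i + 1) = b then ((List.range mid).map (fun i => l.getD (mid + 1 + i) 0 + l.getD i 0)).getD i 0 else 0)
          = (if g (i + 1) = b then l.getD i 0 else 0) + (if g (i + 1) = b then l.getD (mid + 1 + i) 0 else 0) := by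
      intro i hi
      have hil : i < mid := Finset.mem_range.mp hi
      have : ((List.range mid).map (fun i => l.getD (mid + 1 + i) 0 + l.getD i 0)).getD i 0
          = l.getD (mid + 1 + i) 0 + l.getD i 0 := by
        rw [List.getD_eq_getElem _ _ (by simpa using hil)]
        simp
      rw [this]
      split_ifs <;> ring
    rw [Finset.sum_congr rfl e3, Finset.sum_add_distrib]
    have hm0 : mid + 0 = mid := by omega
    rw [hm0]
    ring

-- main lemma: A's fueled loop equals B's scatter along the recorded lengths
lemma loop_eq_scatter : ∀ (k : Nat) (l : List Int),
    pvLoopA l k = pvScatter (fun i => (pvLensF l.length k).1.foldl pvJump i)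
      (List.replicate (pvLensF l.length k).2 0) l 0 := by
  intro k
  induction k with
  | zero =>
    intro l
    show l = pvScatter (fun i => ([] : List Nat).foldl pvJump i) (List.replicate l.length 0) l 0
    simp only [List.foldl_nil]
    exact (scatter_id l).symm
  | succ k ih =>
    intro l
    by_cases hc : 1 < l.length
    · have hL : pvLensF l.length (k + 1)
          = (l.length :: (pvLensF (l.length - l.length / 2) k).1, (pvLensF (l.length - l.length / 2) k).2) := by
        rw [pvLensF, if_pos hc]
      rw [hL]
      dsimp only
      have hstep : pvLoopA l (k + 1) = pvLoopA (pvFoldOnce l) k := by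
        rw [pvLoopA, step_eq_fold]
      rw [hstep, ih (pvFoldOnce l), foldOnce_length]
      -- both sides to bucket-sum form, then regroup with cSum_jump
      rw [scatter_eq_map, scatter_eq_map]
      apply List.ext_getElem
      · simp
      · intro b h1 h2
        simp only [List.getElem_map, List.getElem_range]
        congr 1
        exact (cSum_jump l (fun i => (pvLensF (l.length - l.length / 2) k).1.foldl pvJump i) b).symm
    · have hL : pvLensF l.length (k + 1) = ([], l.length) := by
        rw [pvLensF, if_neg hc]
      rw [hL]
      have hfix : pvLoopA l (k + 1) = l := loopA_fix l (by omega) (k + 1)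
      rw [hfix]
      show l = pvScatter (fun i => ([] : List Nat).foldl pvJump i) (List.replicate l.length 0) l 0
      simp only [List.foldl_nil]
      exact (scatter_id l).symm

-- ===== VERDICT (by name: the statement is the Claim_ definition above) =====
theorem split_and_add_spec : Claim_equal_split_and_add := by
  intro numbers n _
  unfold Spec_split_and_add split_and_add split_and_add_alt
  by_cases h : n = 0
  · simp [h]
  · rw [if_neg h, if_neg h]
    have hl : pvLens numbers.length 0 n = pvLensF numbers.length n.toNat :=
      pvLens_eq_fuel n.toNat numbers.length 0 n (by omega)
    rw [loop_eq_scatter n.toNat numbers, hl]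
    rfl
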